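-- pv_equiv track=rewrite | github.com/abhay0kashyap/smart-code-reviewer | analyzer/executor.py | _remove_invalid_trailing_backslashes
-- ===== SOURCE A (Python) =====
-- def _remove_invalid_trailing_backslashes(code: str) -> str:
--     lines = code.splitlines()
--     if not lines:
--         return code
--
--     cleaned = []
--     for idx, line in enumerate(lines):
--         stripped = line.rstrip()
--         if stripped.endswith("\\"):
--             # Keep valid continuation only when there's a next non-empty, non-comment line.
--             next_line = lines[idx + 1].strip() if idx + 1 < len(lines) else ""
--             if not next_line or next_line.startswith("#"):
--                 cleaned.append(stripped[:-1].rstrip())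
--                 continue
--         cleaned.append(line)
--     return "\n".join(cleaned)
-- ===== SOURCE B (Python) =====
-- def _fix(line, nxt):
--     """Clean one line given the ORIGINAL following line (None when there is none)."""
--     stripped = line.rstrip()
--     if stripped.endswith("\\"):
--         n = nxt.strip() if nxt is not None else ""
--         if not n or n.startswith("#"):
--             return stripped[:-1].rstrip()
--     return line
--
-- def _go(ls):
--     """Structural recursion on the line list: the next line is visible in the pattern."""
--     if not ls:
--         return []
--     if len(ls) == 1:
--         return [_fix(ls[0], None)]
--     return [_fix(ls[0], ls[1])] + _go(ls[1:])
--
-- def _remove_invalid_trailing_backslashes(code: str) -> str: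
--     lines = code.splitlines()
--     if not lines:
--         return code
--     return "\n".join(_go(lines))
-- ===== Notes on version B (the rewrite author's own statement) =====
-- stated objective: alternative
-- what changed: Replaces A's forward indexed loop with lines[idx+1] lookahead and an accumulator by a structural recursion that pattern-matches the first two lines of the remaining list (no indices, no loop state), with the per-line decision factored into a helper applied to (line, next-original-line-or-None).
import Mathlib
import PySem

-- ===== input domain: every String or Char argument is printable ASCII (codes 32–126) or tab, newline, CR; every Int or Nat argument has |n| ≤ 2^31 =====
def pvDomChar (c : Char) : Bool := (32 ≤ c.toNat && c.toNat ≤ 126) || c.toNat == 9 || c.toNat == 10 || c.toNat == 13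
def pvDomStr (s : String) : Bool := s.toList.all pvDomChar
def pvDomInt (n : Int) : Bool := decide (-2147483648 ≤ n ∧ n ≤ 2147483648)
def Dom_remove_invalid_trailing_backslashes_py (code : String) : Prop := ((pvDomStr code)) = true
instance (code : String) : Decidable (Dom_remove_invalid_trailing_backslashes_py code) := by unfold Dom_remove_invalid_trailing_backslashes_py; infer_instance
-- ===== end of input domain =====

-- B replaces A's indexed forward loop with lines[idx+1] lookahead by a structural
-- recursion pattern-matching the first two lines of the remaining list; objective: alternative decomposition.

-- ===== PORT A =====
-- loop body of A's for-loop (closes over the full `lines` list for the lines[idx+1] lookahead)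
def pvStepA (lines : List String) (cleaned : List String) (p : Int × String) : List String :=
  let stripped := PySem.Str.rstrip p.2
  if PySem.Str.endswith stripped "\\" then
    let next_line := if p.1 + 1 < (lines.length : Int)
      then PySem.Str.strip (PySem.List.pyGetD lines (p.1 + 1) "") else ""
    if next_line == "" || PySem.Str.startswith next_line "#" then
      cleaned ++ [PySem.Str.rstrip (PySem.Str.slice stripped none (some (-1)))]
    else cleaned ++ [p.2]
  else cleaned ++ [p.2]

def remove_invalid_trailing_backslashes_py (code : String) : String :=
  let lines := PySem.Str.splitlines code
  if lines = [] then code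
  else
    let cleaned := (PySem.List.enumerate lines 0).foldl (pvStepA lines) []
    PySem.Str.join "\n" cleaned

-- ===== PORT B =====
-- B's helper _fix: clean one line given the ORIGINAL following line (none when there is none)
def pvFix (line : String) (nxt : Option String) : String :=
  let stripped := PySem.Str.rstrip line
  if PySem.Str.endswith stripped "\\" then
    let n := match nxt with
      | none => ""
      | some s => PySem.Str.strip s
    if n == "" || PySem.Str.startswith n "#" then
      PySem.Str.rstrip (PySem.Str.slice stripped none (some (-1)))
    else line
  else line

-- B's helper _go: structural recursion on the line list, next line visible in the pattern
def pvGo : List String → List String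
  | [] => []
  | [l] => [pvFix l none]
  | l :: m :: rest => pvFix l (some m) :: pvGo (m :: rest)

def remove_invalid_trailing_backslashes_py_alt (code : String) : String :=
  let lines := PySem.Str.splitlines code
  if lines = [] then code
  else PySem.Str.join "\n" (pvGo lines)

-- ===== PRECONDITION & SPEC =====
def Spec_remove_invalid_trailing_backslashes_py (code : String) (out : String) : Prop := out = remove_invalid_trailing_backslashes_py_alt code
instance (code : String) (out : String) : Decidable (Spec_remove_invalid_trailing_backslashes_py code out) := by unfold Spec_remove_invalid_trailing_backslashes_py; infer_instance

-- ===== CLAIM (what is proved, stated in full; the proofs are below) =====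
def Claim_equal_remove_invalid_trailing_backslashes_py : Prop := ∀ (code : String), Dom_remove_invalid_trailing_backslashes_py code → Spec_remove_invalid_trailing_backslashes_py code (remove_invalid_trailing_backslashes_py code)

-- ===== LEMMAS AND PROOFS =====

-- strip() of the first line of the remaining suffix ("" when there is none)
def pvNextOf : List String → String
  | [] => ""
  | r :: _ => PySem.Str.strip r

theorem pvIfPush {c : Prop} [Decidable c] (x : List String) (u v : String) :
    (if c then x ++ [u] else x ++ [v]) = x ++ [if c then u else v] := by
  split_ifs <;> rfl

-- pvFix expressed through pvNextOf of the remaining suffix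
theorem pvFix_eq (l : String) (rest : List String) :
    pvFix l (rest.head?) =
      (let stripped := PySem.Str.rstrip l
       if PySem.Str.endswith stripped "\\" then
         if pvNextOf rest == "" || PySem.Str.startswith (pvNextOf rest) "#" then
           PySem.Str.rstrip (PySem.Str.slice stripped none (some (-1)))
         else l
       else l) := by
  cases rest <;> rfl

-- pvGo unfolded one step via head?
theorem pvGo_cons (l : String) (rest : List String) :
    pvGo (l :: rest) = pvFix l rest.head? :: pvGo rest := by
  cases rest <;> rfl

theorem pvFoldA_spec (all : List String) :
    ∀ (suf : List String) (k : Nat) (acc : List String), all.drop k = suf →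
      (PySem.List.enumerate suf (k : Int)).foldl (pvStepA all) acc = acc ++ pvGo suf := by
  intro suf
  induction suf with
  | nil => intro k acc _; simp [pvGo, PySem.List.enumerate]
  | cons l rest ih =>
      intro k acc hdrop
      have hlen : all.length - k = rest.length + 1 := by
        have := congrArg List.length hdrop; simpa using this
      have hL : all.length = k + 1 + rest.length := by omega
      have hk1 : all.drop (k + 1) = rest := by
        have h : (all.drop k).drop 1 = rest := by rw [hdrop]; rfl
        simpa [List.drop_drop, Nat.add_comm] using h
      have hnext : (if (k : Int) + 1 < (all.length : Int)
          then PySem.Str.strip (PySem.List.pyGetD all ((k : Int) + 1) "") else "") = pvNextOf rest := by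
        cases rest with
        | nil =>
            have hL0 : all.length = k + 1 := by simpa using hL
            have hng : ¬ ((k : Int) + 1 < (all.length : Int)) := by omega
            rw [if_neg hng]; rfl
        | cons r rs =>
            have hg : ((k : Int) + 1 < (all.length : Int)) := by simp at hL; omega
            have hc : ((k : Int) + 1) = ((k + 1 : Nat) : Int) := by push_cast; ring
            have h0 : all[k+1]? = some r := by
              have hdg : (List.drop (k+1) all)[(0:Nat)]? = all[k+1+0]? := List.getElem?_drop
              rw [hk1] at hdg
              simpa using hdg.symm
            have hget : PySem.List.pyGetD all ((k : Int) + 1) "" = r := by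
              rw [hc, PySem.List.pyGetD_natCast]
              simp [List.getD, h0]
            rw [if_pos hg, hget]; rfl
      have hstep : pvStepA all acc ((k : Int), l) = acc ++ [pvFix l rest.head?] := by
        rw [pvFix_eq]
        simp only [pvStepA, hnext]
        rw [← pvIfPush, ← pvIfPush]
      rw [PySem.List.enumerate_cons, List.foldl_cons, hstep]
      have hc : ((k : Int) + 1) = ((k + 1 : Nat) : Int) := by push_cast; ring
      rw [hc, ih (k + 1) _ hk1, pvGo_cons]
      simp

-- ===== VERDICT (by name: the statement is the Claim_ definition above) =====
theorem remove_invalid_trailing_backslashes_py_spec : Claim_equal_remove_invalid_trailing_backslashes_py := by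
  unfold Claim_equal_remove_invalid_trailing_backslashes_py
  intro code _
  unfold Spec_remove_invalid_trailing_backslashes_py
  unfold remove_invalid_trailing_backslashes_py remove_invalid_trailing_backslashes_py_alt
  by_cases h : PySem.Str.splitlines code = []
  · simp [h]
  · simp only [h, if_false]
    have hA := pvFoldA_spec (PySem.Str.splitlines code) (PySem.Str.splitlines code) 0 [] (by simp)
    simp only [Nat.cast_zero] at hA
    rw [hA]
    simp
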